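-- pv_equiv track=rewrite | github.com/optimind-studio/optimind-docs-agent | scripts/polish/reconstruct.py | _greedy_cluster
-- ===== SOURCE A (Python) =====
-- def _greedy_cluster(values: list[int], tol: int) -> list[int]:
--     """Return cluster centers. `values` must be sorted ascending."""
--     if not values:
--         return []
--     anchors: list[int] = [values[0]]
--     bucket: list[int] = [values[0]]
--     for v in values[1:]:
--         if v - bucket[-1] <= tol:
--             bucket.append(v)
--             anchors[-1] = sum(bucket) // len(bucket)
--         else:
--             bucket = [v]
--             anchors.append(v)
--     return anchors
-- ===== SOURCE B (Python) =====
-- def _greedy_cluster(values: list[int], tol: int) -> list[int]: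
--     """Return cluster centers. `values` must be sorted ascending.
--
--     One pass keeping a running sum/count of the current bucket instead of
--     re-summing the bucket on every append; centers are emitted only when a
--     bucket closes (and once at the end).
--     """
--     out: list[int] = []
--     s = 0
--     cnt = 0
--     prev = None
--     for v in values:
--         if prev is not None and v - prev <= tol:
--             s += v
--             cnt += 1
--         else:
--             if cnt:
--                 out.append(s // cnt)
--             s, cnt = v, 1
--         prev = v
--     if cnt:
--         out.append(s // cnt)
--     return out
-- ===== Notes on version B (the rewrite author's own statement) =====
-- stated objective: faster
-- what changed: Single pass keeping a running sum and count of the current bucket and emitting each center once when the bucket closes, instead of re-summing the whole bucket on every appended element.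
import Mathlib
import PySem

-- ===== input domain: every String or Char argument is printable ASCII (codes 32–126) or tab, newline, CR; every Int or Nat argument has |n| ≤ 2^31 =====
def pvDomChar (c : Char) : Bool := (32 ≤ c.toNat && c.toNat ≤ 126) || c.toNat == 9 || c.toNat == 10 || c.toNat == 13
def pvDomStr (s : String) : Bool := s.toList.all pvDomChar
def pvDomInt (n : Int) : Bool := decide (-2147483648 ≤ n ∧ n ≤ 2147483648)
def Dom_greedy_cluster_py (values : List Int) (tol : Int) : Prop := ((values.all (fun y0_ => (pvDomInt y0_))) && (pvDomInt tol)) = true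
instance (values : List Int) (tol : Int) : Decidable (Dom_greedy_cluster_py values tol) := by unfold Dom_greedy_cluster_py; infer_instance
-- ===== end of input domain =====

-- B replaces A's re-summing of the whole bucket on every append by a single pass with a
-- running sum/count, emitting each center once when its bucket closes (asymptotically faster).


-- ===== PORT A =====
-- one loop step of A: state = (anchors, bucket); bucket[-1] via getLast?.getD (bucket is never empty)
def gcStepA (tol : Int) (st : List Int × List Int) (v : Int) : List Int × List Int :=
  if v - (st.2.getLast?.getD 0) ≤ tol then
    let bucket' := st.2 ++ [v]
    (st.1.dropLast ++ [PySem.Int.floordiv bucket'.sum (bucket'.length : Int)], bucket')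
  else
    (st.1 ++ [v], [v])

def greedy_cluster_py (values : List Int) (tol : Int) : List Int :=
  match values with
  | [] => []
  | v0 :: rest => (rest.foldl (gcStepA tol) ([v0], [v0])).1

-- ===== PORT B =====
-- one loop step of B: state = (out, s, cnt, prev)
def gcStepB (tol : Int) (st : List Int × Int × Int × Option Int) (v : Int) : List Int × Int × Int × Option Int :=
  match st with
  | (out, s, cnt, prev) =>
    match prev with
    | some p =>
      if v - p ≤ tol then (out, s + v, cnt + 1, some v)
      else ((if cnt ≠ 0 then out ++ [PySem.Int.floordiv s cnt] else out), v, 1, some v)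
    | none => ((if cnt ≠ 0 then out ++ [PySem.Int.floordiv s cnt] else out), v, 1, some v)

def gcFinishB (st : List Int × Int × Int × Option Int) : List Int :=
  if st.2.2.1 ≠ 0 then st.1 ++ [PySem.Int.floordiv st.2.1 st.2.2.1] else st.1

def greedy_cluster_py_alt (values : List Int) (tol : Int) : List Int :=
  gcFinishB (values.foldl (gcStepB tol) ([], 0, 0, none))

-- ===== PRECONDITION & SPEC =====
def Spec_greedy_cluster_py (values : List Int) (tol : Int) (out : List Int) : Prop := out = greedy_cluster_py_alt values tol
instance (values : List Int) (tol : Int) (out : List Int) : Decidable (Spec_greedy_cluster_py values tol out) := by unfold Spec_greedy_cluster_py; infer_instance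

-- ===== CLAIM (what is proved, stated in full; the proofs are below) =====
def Claim_equal_greedy_cluster_py : Prop := ∀ (values : List Int) (tol : Int), Dom_greedy_cluster_py values tol → Spec_greedy_cluster_py values tol (greedy_cluster_py values tol)

-- ===== LEMMAS AND PROOFS =====

theorem gc_floordiv_one (a : Int) : PySem.Int.floordiv a 1 = a := by
  rw [PySem.Int.floordiv_eq_ediv_of_pos (by norm_num)]; simp

-- loop invariant: B's fold (plus the final flush) over the remaining elements, started from
-- a bucket summary (sum, length, last), equals the first component of A's fold started from
-- out ++ [center of the current bucket] and the bucket itself.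
theorem gc_inv (tol : Int) (rest : List Int) :
    ∀ (out : List Int) (bucket : List Int) (l : Int), bucket.getLast? = some l →
      gcFinishB (rest.foldl (gcStepB tol)
          (out, bucket.sum, (bucket.length : Int), some l))
        = (rest.foldl (gcStepA tol)
            (out ++ [PySem.Int.floordiv bucket.sum (bucket.length : Int)], bucket)).1 := by
  induction rest with
  | nil =>
    intro out bucket l hl
    have hb : bucket ≠ [] := by intro h; rw [h] at hl; simp at hl
    have hcnt : ((bucket.length : Int)) ≠ 0 := by
      have := List.length_pos_iff.mpr hb; omega
    simp only [List.foldl_nil, gcFinishB]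
    rw [if_pos hcnt]
  | cons v rest ih =>
    intro out bucket l hl
    have hb : bucket ≠ [] := by intro h; rw [h] at hl; simp at hl
    have hcnt : ((bucket.length : Int)) ≠ 0 := by
      have := List.length_pos_iff.mpr hb; omega
    rw [List.foldl_cons, List.foldl_cons]
    by_cases hc : v - l ≤ tol
    · -- v joins the bucket
      have hA : gcStepA tol (out ++ [PySem.Int.floordiv bucket.sum (bucket.length : Int)], bucket) v
          = (out ++ [PySem.Int.floordiv (bucket ++ [v]).sum ((bucket ++ [v]).length : Int)], bucket ++ [v]) := by
        simp only [gcStepA, hl, Option.getD_some]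
        rw [if_pos hc]
        simp
      have hB : gcStepB tol (out, bucket.sum, (bucket.length : Int), some l) v
          = (out, (bucket ++ [v]).sum, ((bucket ++ [v]).length : Int), some v) := by
        simp only [gcStepB]
        rw [if_pos hc]
        simp
      rw [hA, hB]
      exact ih out (bucket ++ [v]) v (by simp)
    · -- bucket closes, v starts a new one
      have hA : gcStepA tol (out ++ [PySem.Int.floordiv bucket.sum (bucket.length : Int)], bucket) v
          = ((out ++ [PySem.Int.floordiv bucket.sum (bucket.length : Int)]) ++ [v], [v]) := by
        simp only [gcStepA, hl, Option.getD_some]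
        rw [if_neg hc]
      have hB : gcStepB tol (out, bucket.sum, (bucket.length : Int), some l) v
          = (out ++ [PySem.Int.floordiv bucket.sum (bucket.length : Int)], v, 1, some v) := by
        simp only [gcStepB]
        rw [if_neg hc, if_pos hcnt]
      rw [hA, hB]
      have := ih (out ++ [PySem.Int.floordiv bucket.sum (bucket.length : Int)]) [v] v (by simp)
      simpa [gc_floordiv_one] using this

-- ===== VERDICT (by name: the statement is the Claim_ definition above) =====
theorem greedy_cluster_py_spec : Claim_equal_greedy_cluster_py := by
  intro values tol _
  unfold Spec_greedy_cluster_py greedy_cluster_py greedy_cluster_py_alt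
  cases values with
  | nil => simp [gcFinishB]
  | cons v0 rest =>
    rw [List.foldl_cons]
    have h0 : gcStepB tol ([], 0, 0, none) v0 = ([], v0, 1, some v0) := by
      simp [gcStepB]
    rw [h0]
    have := gc_inv tol rest [] [v0] v0 (by simp)
    simpa [gc_floordiv_one] using this.symm
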